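-- pv_equiv track=rewrite | github.com/bowenzou3/Arrangr | Arrangr.py | beat_simplify_rhythm
-- ===== SOURCE A (Python) =====
-- def beat_simplify_rhythm(melody_beats: list,
--                          beats_per_measure: int = 4) -> list:
--     """
--     Collapse consecutive same-pitch beats into whole (4) or half (2) notes.
--     Returns list of {start_beat, midi, duration_beats}.
--     """
--     if not melody_beats:
--         return []
--
--     simplified = []
--     i = 0
--     while i < len(melody_beats):
--         current_midi = melody_beats[i]["midi"]
--         run = 1
--         while (i + run < len(melody_beats) and
--                melody_beats[i + run]["midi"] == current_midi and
--                run < beats_per_measure):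
--             run += 1
--
--         dur = 4 if run >= 3 else 2
--
--         simplified.append({
--             "start_beat":     melody_beats[i]["beat"],
--             "midi":           current_midi,
--             "duration_beats": dur,
--         })
--         i += run
--
--     return simplified
-- ===== SOURCE B (Python) =====
-- from itertools import groupby
--
--
-- def beat_simplify_rhythm(melody_beats: list,
--                          beats_per_measure: int = 4) -> list:
--     """Group consecutive same-pitch beats, then chunk each group by measure."""
--     cap = max(beats_per_measure, 1)
--     simplified = []
--     for midi, grp in groupby(melody_beats, key=lambda b: b["midi"]):
--         run = list(grp)
--         for j in range(0, len(run), cap):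
--             chunk = run[j:j + cap]
--             simplified.append({
--                 "start_beat":     chunk[0]["beat"],
--                 "midi":           midi,
--                 "duration_beats": 4 if len(chunk) >= 3 else 2,
--             })
--     return simplified
-- ===== Notes on version B (the rewrite author's own statement) =====
-- stated objective: idiomatic
-- what changed: Replaces the index-jumping nested while loops with a groupby pass that materializes maximal same-pitch runs followed by a fixed-stride chunking of each run (stride clamped to max(beats_per_measure,1)).
import Mathlib
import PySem

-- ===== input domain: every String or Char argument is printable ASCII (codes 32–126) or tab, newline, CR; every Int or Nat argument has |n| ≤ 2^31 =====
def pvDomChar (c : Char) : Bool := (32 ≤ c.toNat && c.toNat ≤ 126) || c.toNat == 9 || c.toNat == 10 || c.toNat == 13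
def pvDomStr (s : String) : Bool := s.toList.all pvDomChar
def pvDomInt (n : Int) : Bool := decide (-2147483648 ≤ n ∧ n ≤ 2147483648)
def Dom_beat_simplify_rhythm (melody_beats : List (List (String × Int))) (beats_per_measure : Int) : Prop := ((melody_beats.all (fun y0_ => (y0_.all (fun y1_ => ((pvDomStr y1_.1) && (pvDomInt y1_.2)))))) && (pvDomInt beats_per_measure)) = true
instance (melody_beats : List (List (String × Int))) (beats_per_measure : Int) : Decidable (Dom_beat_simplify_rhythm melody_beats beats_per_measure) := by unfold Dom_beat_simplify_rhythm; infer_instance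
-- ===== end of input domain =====

-- B replaces A's index-jumping nested while loops by a groupby-into-maximal-runs pass followed by
-- fixed-stride chunking of each run (decomposition change, same O(n) cost). No argument is mutated.

-- ===== PORT A =====
-- first-match assoc lookup: exact for 'd[k]' whenever the key is present (guaranteed by Pre_);
-- on a missing key the Python raises KeyError (excluded by Pre_), here it returns 0.
def pvGetKey (d : List (String × Int)) (k : String) : Int :=
  (((d.find? (fun p => p.1 == k)).map Prod.snd).getD 0)

def pvIdx (mb : List (List (String × Int))) (i : Nat) : List (String × Int) := mb.getD i []

-- inner while loop of A: grow 'run' while in range, same pitch, and run < beats_per_measure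
def pvRunA (mb : List (List (String × Int))) (bpm cur : Int) (i run : Nat) : Nat :=
  if h : i + run < mb.length ∧ pvGetKey (pvIdx mb (i + run)) "midi" == cur ∧ (run : Int) < bpm then
    pvRunA mb bpm cur i (run + 1)
  else run
termination_by mb.length - (i + run)
decreasing_by omega

-- needed by pvLoopA's termination: the inner loop never shrinks run
theorem pvRunA_ge (mb : List (List (String × Int))) (bpm cur : Int) (i run : Nat) :
    run ≤ pvRunA mb bpm cur i run := by
  rw [pvRunA]
  split
  · exact le_trans (Nat.le_succ run) (pvRunA_ge mb bpm cur i (run + 1))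
  · exact le_refl run
termination_by mb.length - (i + run)
decreasing_by omega

-- outer while loop of A
def pvLoopA (mb : List (List (String × Int))) (bpm : Int) (i : Nat)
    (acc : List (List (String × Int))) : List (List (String × Int)) :=
  if _h : i < mb.length then
    let cur := pvGetKey (pvIdx mb i) "midi"
    let run := pvRunA mb bpm cur i 1
    let dur : Int := if 3 ≤ run then 4 else 2
    pvLoopA mb bpm (i + run)
      (acc ++ [[("start_beat", pvGetKey (pvIdx mb i) "beat"), ("midi", cur), ("duration_beats", dur)]])
  else acc
termination_by mb.length - i
decreasing_by have := pvRunA_ge mb bpm (pvGetKey (pvIdx mb i) "midi") i 1; omega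

def beat_simplify_rhythm (melody_beats : List (List (String × Int))) (beats_per_measure : Int) :
    List (List (String × Int)) :=
  if melody_beats.isEmpty then [] else pvLoopA melody_beats beats_per_measure 0 []

-- ===== PORT B =====
-- itertools.groupby(melody_beats, key=lambda b: b["midi"]) with materialized groups
def pvGroupBy (mb : List (List (String × Int))) : List (Int × List (List (String × Int))) :=
  match mb with
  | [] => []
  | d :: rest =>
    let k := pvGetKey d "midi"
    (k, d :: rest.takeWhile (fun e => pvGetKey e "midi" == k)) ::
      pvGroupBy (rest.dropWhile (fun e => pvGetKey e "midi" == k))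
termination_by mb.length
decreasing_by
  simpa using Nat.lt_succ_of_le (List.length_dropWhile_le _ _)

-- run[j:j+cap] for j in range(0, len(run), cap); the stride cap = max(bpm,1) ≥ 1 is passed as c+1
def pvChunks (c : Nat) : List (List (String × Int)) → List (List (List (String × Int)))
  | [] => []
  | d :: t => ((d :: t).take (c + 1)) :: pvChunks c ((d :: t).drop (c + 1))
termination_by l => l.length
decreasing_by simp

-- the dict appended for one chunk
def pvNote (k : Int) (chunk : List (List (String × Int))) : List (String × Int) :=
  [("start_beat", pvGetKey (chunk.headD []) "beat"), ("midi", k),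
   ("duration_beats", if 3 ≤ chunk.length then (4 : Int) else 2)]

def beat_simplify_rhythm_alt (melody_beats : List (List (String × Int))) (beats_per_measure : Int) :
    List (List (String × Int)) :=
  (pvGroupBy melody_beats).flatMap
    (fun g => (pvChunks ((max beats_per_measure 1).toNat - 1) g.2).map (pvNote g.1))

-- ===== PRECONDITION & SPEC =====
-- Pre_ excludes inputs where some beat dict lacks a "midi" or "beat" key: a missing "midi" always
-- makes A raise KeyError, and a missing "beat" makes A raise exactly at run starts — a position set
-- depending on the run structure — so Pre_ conservatively requires both keys everywhere (slightly
-- narrower: a non-run-start element missing only "beat" is excluded although A returns there).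
def Pre_beat_simplify_rhythm (melody_beats : List (List (String × Int))) (beats_per_measure : Int) : Prop :=
  ∀ d ∈ melody_beats, (d.find? (fun p => p.1 == "midi")).isSome ∧ (d.find? (fun p => p.1 == "beat")).isSome

instance (melody_beats : List (List (String × Int))) (beats_per_measure : Int) :
    Decidable (Pre_beat_simplify_rhythm melody_beats beats_per_measure) := by
  unfold Pre_beat_simplify_rhythm; infer_instance

def pvWitness_beat_simplify_rhythm : (List (List (String × Int))) × Int :=
  ([[("midi", 60), ("beat", 0)], [("midi", 60), ("beat", 1)], [("midi", 62), ("beat", 2)]], 4)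

def Spec_beat_simplify_rhythm (melody_beats : List (List (String × Int))) (beats_per_measure : Int)
    (out : List (List (String × Int))) : Prop :=
  out = beat_simplify_rhythm_alt melody_beats beats_per_measure

instance (melody_beats : List (List (String × Int))) (beats_per_measure : Int)
    (out : List (List (String × Int))) :
    Decidable (Spec_beat_simplify_rhythm melody_beats beats_per_measure out) := by
  unfold Spec_beat_simplify_rhythm; infer_instance

-- ===== CLAIM (what is proved, stated in full; the proofs are below) =====
def Claim_equal_beat_simplify_rhythm : Prop :=
  ∀ (melody_beats : List (List (String × Int))) (beats_per_measure : Int),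
    Dom_beat_simplify_rhythm melody_beats beats_per_measure →
    Pre_beat_simplify_rhythm melody_beats beats_per_measure →
    Spec_beat_simplify_rhythm melody_beats beats_per_measure
      (beat_simplify_rhythm melody_beats beats_per_measure)

-- ===== LEMMAS AND PROOFS =====

-- common denominator: one list-level recursion consuming min(runlength, cap) elements per note
def pvF (bpm : Int) (l : List (List (String × Int))) : List (List (String × Int)) :=
  match l with
  | [] => []
  | d :: rest =>
    let k := pvGetKey d "midi"
    let kk := min (rest.takeWhile (fun e => pvGetKey e "midi" == k)).length ((max bpm 1).toNat - 1)
    [("start_beat", pvGetKey d "beat"), ("midi", k),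
      ("duration_beats", if 3 ≤ kk + 1 then (4 : Int) else 2)] :: pvF bpm (rest.drop kk)
termination_by l.length
decreasing_by simp

theorem pvRunA_eq_min (mb : List (List (String × Int))) (bpm cur : Int) (i : Nat)
    (run : Nat) (h1 : 1 ≤ run) (h2 : (run : Int) ≤ max bpm 1) :
    pvRunA mb bpm cur i run =
      min (run + ((mb.drop (i + run)).takeWhile (fun e => pvGetKey e "midi" == cur)).length)
          (max bpm 1).toNat := by
  have hmax1 : (1 : Int) ≤ max bpm 1 := le_max_right _ _
  rw [pvRunA]
  split
  next h =>
    obtain ⟨hb, hm, hr⟩ := h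
    have hbpm : (run : Int) + 1 ≤ max bpm 1 := le_trans (by omega) (le_max_left _ _)
    rw [pvRunA_eq_min mb bpm cur i (run + 1) (by omega) (by push_cast; omega)]
    have hidx : pvIdx mb (i + run) = mb[i + run] := by
      simp [pvIdx, List.getD_eq_getElem?_getD, List.getElem?_eq_getElem hb]
    rw [hidx] at hm
    rw [List.drop_eq_getElem_cons hb, List.takeWhile_cons, if_pos hm]
    simp only [List.length_cons, Nat.add_assoc]
    omega
  next h =>
    have hruncap : run ≤ (max bpm 1).toNat := by omega
    by_cases hb : i + run < mb.length
    · by_cases hm : (pvGetKey (pvIdx mb (i + run)) "midi" == cur) = true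
      · have hr : ¬ ((run : Int) < bpm) := fun hh => h ⟨hb, hm, hh⟩
        have hcapr : (max bpm 1).toNat ≤ run := by
          rcases max_choice bpm 1 with hc | hc <;> rw [hc] <;> omega
        omega
      · have hidx : pvIdx mb (i + run) = mb[i + run] := by
          simp [pvIdx, List.getD_eq_getElem?_getD, List.getElem?_eq_getElem hb]
        rw [hidx] at hm
        rw [List.drop_eq_getElem_cons hb, List.takeWhile_cons, if_neg hm]
        simp only [List.length_nil]
        omega
    · rw [List.drop_eq_nil_of_le (by omega)]
      simp only [List.takeWhile_nil, List.length_nil]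
      omega
termination_by mb.length - (i + run)
decreasing_by omega

theorem pvLoopA_eq (mb : List (List (String × Int))) (bpm : Int) (i : Nat)
    (acc : List (List (String × Int))) :
    pvLoopA mb bpm i acc = acc ++ pvF bpm (mb.drop i) := by
  have hmax1 : (1 : Int) ≤ max bpm 1 := le_max_right _ _
  rw [pvLoopA]
  split
  next h =>
    have hidx : pvIdx mb i = mb[i] := by
      simp [pvIdx, List.getD_eq_getElem?_getD, List.getElem?_eq_getElem h]
    have hrunval : pvRunA mb bpm (pvGetKey (pvIdx mb i) "midi") i 1 =
        min ((mb.drop (i + 1)).takeWhile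
            (fun e => pvGetKey e "midi" == pvGetKey (pvIdx mb i) "midi")).length
          ((max bpm 1).toNat - 1) + 1 := by
      rw [pvRunA_eq_min mb bpm (pvGetKey (pvIdx mb i) "midi") i 1 (by omega)
        (by push_cast; omega)]
      omega
    rw [pvLoopA_eq mb bpm _ _]
    rw [List.drop_eq_getElem_cons h, pvF]
    rw [hrunval, hidx, List.drop_drop]
    simp only [List.append_assoc, List.singleton_append]
    rw [show i + (min ((List.takeWhile (fun e => pvGetKey e "midi" == pvGetKey mb[i] "midi")
          (mb.drop (i + 1))).length) ((max bpm 1).toNat - 1) + 1) = i + 1 +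
        min ((List.takeWhile (fun e => pvGetKey e "midi" == pvGetKey mb[i] "midi")
          (mb.drop (i + 1))).length) ((max bpm 1).toNat - 1) from by omega]
  next h =>
    rw [List.drop_eq_nil_of_le (by omega), pvF]
    simp
termination_by mb.length - i
decreasing_by have := pvRunA_ge mb bpm (pvGetKey (pvIdx mb i) "midi") i 1; omega

theorem pvChunks_cons (c : Nat) (d : List (String × Int)) (t : List (List (String × Int))) :
    pvChunks c (d :: t) = ((d :: t).take (c + 1)) :: pvChunks c ((d :: t).drop (c + 1)) := by
  rw [pvChunks]

theorem takeWhile_all_append {α : Type} (p : α → Bool) (t r : List α)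
    (ht : ∀ e ∈ t, p e = true) (hr : r.takeWhile p = []) :
    (t ++ r).takeWhile p = t := by
  induction t with
  | nil => rw [List.nil_append]; exact hr
  | cons a t ih =>
    rw [List.cons_append, List.takeWhile_cons, if_pos (ht a (List.mem_cons_self ..))]
    rw [ih (fun e he => ht e (List.mem_cons_of_mem _ he))]

theorem pvF_group (bpm : Int) (t r : List (List (String × Int)))
    (d : List (String × Int)) (k : Int)
    (hd : pvGetKey d "midi" = k)
    (ht : ∀ e ∈ t, pvGetKey e "midi" = k)
    (hr : (r.takeWhile (fun e => pvGetKey e "midi" == k)) = []) :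
    pvF bpm (d :: (t ++ r)) =
      (pvChunks ((max bpm 1).toNat - 1) (d :: t)).map (pvNote k) ++ pvF bpm r := by
  have hmax1 : (1 : Int) ≤ max bpm 1 := le_max_right _ _
  rw [pvF, hd]
  rw [takeWhile_all_append _ t r (fun e he => by rw [ht e he]; simp) hr]
  by_cases hlen : t.length ≤ (max bpm 1).toNat - 1
  · rw [min_eq_left hlen, List.drop_left]
    rw [pvChunks]
    rw [List.drop_eq_nil_of_le (by simp only [List.length_cons]; omega)]
    rw [pvChunks]
    rw [List.take_of_length_le (by simp only [List.length_cons]; omega)]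
    simp [pvNote]
  · rw [not_le] at hlen
    rw [min_eq_right (by omega)]
    rw [List.drop_append_of_le_length (by omega)]
    cases htd : t.drop ((max bpm 1).toNat - 1) with
    | nil =>
      exfalso
      have := congrArg List.length htd
      simp at this
      omega
    | cons e t' =>
      have hlt' : t'.length < t.length := by
        have := congrArg List.length htd
        simp at this
        omega
      have hd' : pvGetKey e "midi" = k :=
        ht e (List.mem_of_mem_drop (htd ▸ List.mem_cons_self ..))
      have ht' : ∀ x ∈ t', pvGetKey x "midi" = k :=
        fun x hx => ht x (List.mem_of_mem_drop (htd ▸ List.mem_cons_of_mem _ hx))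
      rw [List.cons_append]
      rw [pvF_group bpm t' r e k hd' ht' hr]
      rw [pvChunks_cons ((max bpm 1).toNat - 1) d t, List.drop_succ_cons, htd,
        List.take_succ_cons, List.map_cons]
      simp only [List.cons_append]
      congr 1
      simp [pvNote, List.length_take]
      omega
termination_by t.length
decreasing_by omega

theorem takeWhile_dropWhile_nil {α : Type} (p : α → Bool) (l : List α) :
    (l.dropWhile p).takeWhile p = [] := by
  induction l with
  | nil => rfl
  | cons a l ih =>
    rw [List.dropWhile_cons]
    by_cases h : p a = true
    · simp [h, ih]
    · rw [Bool.not_eq_true] at h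
      simp [h]

theorem pvGroupBy_cons (d : List (String × Int)) (rest : List (List (String × Int))) :
    pvGroupBy (d :: rest) =
      (pvGetKey d "midi",
        d :: rest.takeWhile (fun e => pvGetKey e "midi" == pvGetKey d "midi")) ::
        pvGroupBy (rest.dropWhile (fun e => pvGetKey e "midi" == pvGetKey d "midi")) := by
  rw [pvGroupBy]

theorem pvF_eq_alt (bpm : Int) (mb : List (List (String × Int))) :
    pvF bpm mb = beat_simplify_rhythm_alt mb bpm := by
  cases mb with
  | nil =>
    rw [pvF]
    simp only [beat_simplify_rhythm_alt]
    rw [pvGroupBy]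
    simp
  | cons dd rest =>
    have hG := pvF_group bpm
      (rest.takeWhile (fun e => pvGetKey e "midi" == pvGetKey dd "midi"))
      (rest.dropWhile (fun e => pvGetKey e "midi" == pvGetKey dd "midi"))
      dd (pvGetKey dd "midi") rfl
      (fun e he => eq_of_beq (List.mem_takeWhile_imp (p := fun e => pvGetKey e "midi" == pvGetKey dd "midi") he))
      (takeWhile_dropWhile_nil _ rest)
    rw [List.takeWhile_append_dropWhile] at hG
    rw [hG, pvF_eq_alt bpm (rest.dropWhile (fun e => pvGetKey e "midi" == pvGetKey dd "midi"))]
    simp only [beat_simplify_rhythm_alt]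
    rw [pvGroupBy_cons]
    rw [List.flatMap_cons]
termination_by mb.length
decreasing_by
  simpa using Nat.lt_succ_of_le (List.length_dropWhile_le _ _)

-- ===== VERDICT (by name: the statement is the Claim_ definition above) =====
theorem beat_simplify_rhythm_spec : Claim_equal_beat_simplify_rhythm := by
  intro mb bpm _ _
  unfold Spec_beat_simplify_rhythm beat_simplify_rhythm
  by_cases h : mb.isEmpty
  · simp [h]
    have : mb = [] := List.isEmpty_iff.mp h
    subst this
    simp [beat_simplify_rhythm_alt, pvGroupBy]
  · simp [h]
    rw [pvLoopA_eq mb bpm 0 []]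
    simpa using pvF_eq_alt bpm mb
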